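-- pv_equiv track=rewrite | github.com/joseelq/NetworkProtocolsPractice | FTP_Client.py | parse_element
-- ===== SOURCE A (Python) =====
-- ascii_codes = {
--     "A": ord("A"), "Z": ord("Z"),
--     "a": ord("a"), "z": ord("z"),
--     "0": ord("0"), "9": ord("9"),
--     "min_ascii_val": 0, "max_ascii_val": 127}
--
-- def parse_element(command, element_string=""):
--     # Keep track of all elements delimited by "." to return to calling function
--
--     # Ensure first character is a letter
--     if (ord(command[0]) >= ascii_codes["A"] and ord(command[0]) <= ascii_codes["Z"]) \
--     or (ord(command[0]) >= ascii_codes["a"] and ord(command[0]) <= ascii_codes["z"]):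
--         element_string += command[0]
--         command, let_dig_string = parse_let_dig_str(command[1:])
--         element_string += let_dig_string
--         if command[0] == ".":
--             element_string += "."
--             return parse_element(command[1:], element_string)
--         elif command[0] == ' ':
--             return command, element_string
--         else:
--             return "ERROR", element_string
--     elif command[0] == ' ':
--         return command, element_string
--     return "ERROR", element_string
--
-- def parse_let_dig_str(command):
--     let_dig_string = ""
--     while (ord(command[0]) >= ascii_codes["A"] and ord(command[0]) <= ascii_codes["Z"]) \
--     or (ord(command[0]) >= ascii_codes["a"] and ord(command[0]) <= ascii_codes["z"]) \
--     or (ord(command[0]) >= ascii_codes["0"] and ord(command[0]) <= ascii_codes["9"]) \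
--     or (ord(command[0]) == ord('-')):
--         let_dig_string += command[0]
--         if len(command) > 1:
--             command = command[1:]
--         else:
--             return command, let_dig_string
--     return command, let_dig_string
-- ===== SOURCE B (Python) =====
-- def parse_element(command, element_string=""):
--     # Single forward pass as a two-state machine: need_letter (start of a
--     # dotted element) vs. inside a letter/digit/hyphen run. No slicing, no
--     # helper, no recursion.
--     es = element_string
--     need_letter = True
--     for i, c in enumerate(command):
--         if need_letter:
--             if ('A' <= c <= 'Z') or ('a' <= c <= 'z'):
--                 es += c
--                 need_letter = False
--             elif c == ' ':
--                 return command[i:], es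
--             else:
--                 return "ERROR", es
--         else:
--             if ('A' <= c <= 'Z') or ('a' <= c <= 'z') or ('0' <= c <= '9') or c == '-':
--                 es += c
--             elif c == '.':
--                 es += '.'
--                 need_letter = True
--             elif c == ' ':
--                 return command[i:], es
--             else:
--                 return "ERROR", es
--     # ran off the end of the command
--     return "ERROR", es
-- ===== Notes on version B (the rewrite author's own statement) =====
-- stated objective: faster
-- what changed: Replaced A's tail recursion with repeated command[1:] slicing and the parse_let_dig_str helper by a single forward pass implemented as a two-state machine (need-letter vs in-run flag) over the characters, with no slicing or recursion.
import Mathlib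
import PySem

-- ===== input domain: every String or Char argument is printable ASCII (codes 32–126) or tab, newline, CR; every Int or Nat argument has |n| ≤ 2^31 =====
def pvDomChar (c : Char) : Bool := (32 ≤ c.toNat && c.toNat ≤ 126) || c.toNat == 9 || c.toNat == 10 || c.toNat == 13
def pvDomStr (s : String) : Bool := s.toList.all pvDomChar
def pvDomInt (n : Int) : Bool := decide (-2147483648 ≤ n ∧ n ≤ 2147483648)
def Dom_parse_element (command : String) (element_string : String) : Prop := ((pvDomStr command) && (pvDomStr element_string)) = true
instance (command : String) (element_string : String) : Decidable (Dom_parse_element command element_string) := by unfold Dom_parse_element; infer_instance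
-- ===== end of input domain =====

-- B replaces A's tail recursion + repeatedly-sliced helper by a single forward pass
-- (a two-state machine with a need-letter flag); objective: faster (no slicing per step).

-- characters: ASCII letter, and letter/digit/'-' (exactly A's ord-range tests)
def pvIsLetter (c : Char) : Bool := (65 ≤ c.toNat && c.toNat ≤ 90) || (97 ≤ c.toNat && c.toNat ≤ 122)
def pvIsLetDig (c : Char) : Bool := pvIsLetter c || (48 ≤ c.toNat && c.toNat ≤ 57) || c.toNat == 45

-- ===== PORT A =====
-- parse_let_dig_str: Python's while loop with the `len(command) > 1` early return
-- (when the run reaches the last character it is returned still attached to command).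
def ldsA : List Char → List Char → List Char × List Char
  | [], acc => ([], acc)            -- Python raises IndexError here; reached only outside Pre_
  | c :: rest, acc =>
    if pvIsLetDig c then
      if rest.isEmpty then (c :: rest, acc ++ [c])
      else ldsA rest (acc ++ [c])
    else (c :: rest, acc)

theorem ldsA_fst_length_le (l acc : List Char) : (ldsA l acc).1.length ≤ l.length := by
  induction l generalizing acc with
  | nil => simp [ldsA]
  | cons c rest ih =>
    simp only [ldsA]
    split
    · split
      · simp
      · exact le_trans (ih _) (Nat.le_succ _)
    · simp

def peA : List Char → List Char → List Char × List Char
  | [], es => ([], es)              -- Python raises IndexError here; reached only outside Pre_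
  | c :: rest, es =>
    if pvIsLetter c then
      match h : ldsA rest [] with
      | ([], ld) => ([], (es ++ [c]) ++ ld)     -- Python raises IndexError here; outside Pre_
      | (d :: rest2, ld) =>
        if d = '.' then peA rest2 (((es ++ [c]) ++ ld) ++ ['.'])
        else if d = ' ' then (d :: rest2, (es ++ [c]) ++ ld)
        else ("ERROR".toList, (es ++ [c]) ++ ld)
    else if c = ' ' then (c :: rest, es)
    else ("ERROR".toList, es)
termination_by w es => w.length
decreasing_by
  have h1 := ldsA_fst_length_le rest []
  rw [h] at h1
  simp at h1 ⊢
  omega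

def parse_element (command : String) (element_string : String) : String × String :=
  let r := peA command.toList element_string.toList
  (String.mk r.1, String.mk r.2)

-- ===== PORT B =====
-- Source B's for-loop: one forward pass over the characters with the need_letter flag;
-- `command[i:]` at a stop is the as-yet-unconsumed suffix, falling off the loop is ERROR.
def peB : List Char → List Char → Bool → List Char × List Char
  | [], es, _ => ("ERROR".toList, es)
  | c :: rest, es, needLetter =>
    if needLetter then
      if pvIsLetter c then peB rest (es ++ [c]) false
      else if c = ' ' then (c :: rest, es)
      else ("ERROR".toList, es)
    else
      if pvIsLetDig c then peB rest (es ++ [c]) false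
      else if c = '.' then peB rest (es ++ ['.']) true
      else if c = ' ' then (c :: rest, es)
      else ("ERROR".toList, es)

def parse_element_alt (command : String) (element_string : String) : String × String :=
  let r := peB command.toList element_string.toList true
  (String.mk r.1, String.mk r.2)

-- ===== PRECONDITION & SPEC =====
-- split a character list on '.' (plain declarative split, like str.split('.'))
def dotSplit : List Char → List (List Char)
  | [] => [[]]
  | c :: rest =>
    if c = '.' then [] :: dotSplit rest
    else (c :: (dotSplit rest).headI) :: (dotSplit rest).tail

-- a piece strictly before a '.': nonempty, starts with a letter, rest letters/digits/'-'
def pvGoodInit : List Char → Bool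
  | [] => false
  | c :: r => pvIsLetter c && r.all pvIsLetDig

-- the final piece on which A runs off the end: empty, or a single letter
def pvLastOk : List Char → Bool
  | [] => true
  | [c] => pvIsLetter c
  | _ => false

-- the exact inputs on which Python A raises IndexError: every '.'-separated piece before
-- the last is letter·(letdig)*, and the last piece is empty or a single letter
def pvRaisesCond (w : List Char) : Bool :=
  ((dotSplit w).dropLast.all pvGoodInit) && pvLastOk ((dotSplit w).getLastD [])

-- Pre_ excludes exactly the inputs on which A raises IndexError (running off the end of
-- command); it depends only on command, never on element_string.
def Pre_parse_element (command : String) (element_string : String) : Prop :=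
  pvRaisesCond command.toList = false
instance (command : String) (element_string : String) : Decidable (Pre_parse_element command element_string) := by
  unfold Pre_parse_element; infer_instance

def pvWitness_parse_element : String × String := ("abc.de-f QUIT", "")

def Spec_parse_element (command : String) (element_string : String) (out : String × String) : Prop := out = parse_element_alt command element_string
instance (command : String) (element_string : String) (out : String × String) : Decidable (Spec_parse_element command element_string out) := by unfold Spec_parse_element; infer_instance

-- ===== CLAIM (what is proved, stated in full; the proofs are below) =====
def Claim_equal_parse_element : Prop := ∀ (command : String) (element_string : String), Dom_parse_element command element_string → Pre_parse_element command element_string → Spec_parse_element command element_string (parse_element command element_string)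

-- ===== LEMMAS AND PROOFS =====

-- character facts
theorem letdig_ne_dot {d : Char} (h : pvIsLetDig d = true) : d ≠ '.' := by
  rintro rfl; simp [pvIsLetDig, pvIsLetter] at h

theorem letdig_ne_space {d : Char} (h : pvIsLetDig d = true) : d ≠ ' ' := by
  rintro rfl; simp [pvIsLetDig, pvIsLetter] at h

theorem letter_ne_dot {c : Char} (h : pvIsLetter c = true) : c ≠ '.' := by
  rintro rfl; simp [pvIsLetter] at h

-- full characterisation of A's helper: empty input, a scan stopped at a non-letdig
-- character, or a scan that ran to the end of a nonempty all-letdig input (the quirky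
-- case where the last character stays attached to the remainder AND joins the run)
theorem ldsA_spec : ∀ (l acc : List Char),
    (l = [] ∧ ldsA l acc = ([], acc)) ∨
    (∃ ld d rest2, l = ld ++ d :: rest2 ∧ ld.all pvIsLetDig = true ∧ pvIsLetDig d = false ∧
      ldsA l acc = (d :: rest2, acc ++ ld)) ∨
    (l ≠ [] ∧ l.all pvIsLetDig = true ∧ ∃ d, pvIsLetDig d = true ∧ ldsA l acc = ([d], acc ++ l)) := by
  intro l
  induction l with
  | nil => intro acc; left; simp [ldsA]
  | cons c rest ih =>
    intro acc
    by_cases hc : pvIsLetDig c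
    · cases rest with
      | nil =>
        right; right
        exact ⟨by simp, by simp [hc], c, hc, by simp [ldsA, hc]⟩
      | cons e t =>
        have hstep : ldsA (c :: e :: t) acc = ldsA (e :: t) (acc ++ [c]) := by
          rw [ldsA, if_pos hc, if_neg (by simp)]
        rcases ih (acc ++ [c]) with ⟨h1, _⟩ | ⟨ld, d, rest2, heq, hall, hd, hres⟩ | ⟨_, hall, d, hd, hres⟩
        · simp at h1
        · right; left
          exact ⟨c :: ld, d, rest2, by simp [heq], by simp [hc, hall], hd,
            by rw [hstep, hres]; simp⟩
        · right; right
          exact ⟨by simp, by simp [hc, hall], d, hd, by rw [hstep, hres]; simp⟩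
    · right; left
      exact ⟨[], c, rest, by simp, by simp, by simpa using hc,
        by rw [ldsA, if_neg (by simpa using hc)]; simp⟩

-- unfold lemma for A's main branch at a leading letter
theorem peA_cons_letter (c : Char) (rest es : List Char) (hc : pvIsLetter c = true)
    (d : Char) (rest2 ld : List Char) (h : ldsA rest [] = (d :: rest2, ld)) :
    peA (c :: rest) es =
      (if d = '.' then peA rest2 (((es ++ [c]) ++ ld) ++ ['.'])
       else if d = ' ' then (d :: rest2, (es ++ [c]) ++ ld)
       else ("ERROR".toList, (es ++ [c]) ++ ld)) := by
  rw [peA, if_pos hc]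
  split
  next ld' heq =>
    rw [h] at heq; simp at heq
  next d' r2' ld' heq =>
    rw [h] at heq
    simp only [Prod.mk.injEq, List.cons.injEq] at heq
    obtain ⟨⟨e1, e2⟩, e3⟩ := heq
    subst e1; subst e2; subst e3
    rfl

-- the state machine walks through a letdig run, appending it to the accumulator
theorem peB_run : ∀ (run r es : List Char), run.all pvIsLetDig = true →
    peB (run ++ r) es false = peB r (es ++ run) false := by
  intro run
  induction run with
  | nil => intro r es _; simp
  | cons c t ih =>
    intro r es hall
    simp only [List.all_cons, Bool.and_eq_true] at hall
    rw [List.cons_append, peB, if_neg (by simp), if_pos hall.1, ih r (es ++ [c]) hall.2]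
    simp

-- the state machine at a non-letdig character: the three stop branches of Source B
theorem peB_stop (d : Char) (rest2 es : List Char) (hd : pvIsLetDig d = false) :
    peB (d :: rest2) es false =
      (if d = '.' then peB rest2 (es ++ ['.']) true
       else if d = ' ' then (d :: rest2, es)
       else ("ERROR".toList, es)) := by
  rw [peB]
  simp [hd]

-- dotSplit facts
theorem dotSplit_ne_nil : ∀ (w : List Char), dotSplit w ≠ [] := by
  intro w
  cases w with
  | nil => simp [dotSplit]
  | cons c rest =>
    simp only [dotSplit]
    split <;> simp

theorem dotSplit_no_dot : ∀ (l : List Char), '.' ∉ l → dotSplit l = [l] := by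
  intro l
  induction l with
  | nil => intro _; rfl
  | cons c rest ih =>
    intro h
    have hc : c ≠ '.' := fun hh => h (by simp [hh])
    have hr := ih (fun hh => h (List.mem_cons_of_mem _ hh))
    simp only [dotSplit, if_neg hc, hr]
    simp

theorem dotSplit_append : ∀ (l r : List Char), '.' ∉ l →
    dotSplit (l ++ '.' :: r) = l :: dotSplit r := by
  intro l r
  induction l with
  | nil => intro _; simp [dotSplit]
  | cons c rest ih =>
    intro h
    have hc : c ≠ '.' := fun hh => h (by simp [hh])
    have hr := ih (fun hh => h (List.mem_cons_of_mem _ hh))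
    simp only [List.cons_append, dotSplit, if_neg hc, hr]
    simp

-- consuming one good piece and its dot preserves the raise condition
theorem raises_cons_piece (c : Char) (run rest2 : List Char)
    (hc : pvIsLetter c = true) (hrun : run.all pvIsLetDig = true) :
    pvRaisesCond ((c :: run) ++ '.' :: rest2) = pvRaisesCond rest2 := by
  have hnod : '.' ∉ (c :: run) := by
    intro hm
    rcases List.mem_cons.mp hm with h1 | h2
    · exact letter_ne_dot hc h1.symm
    · exact letdig_ne_dot (by simpa using (List.all_eq_true.mp hrun _ h2)) rfl
  have hsplit := dotSplit_append (c :: run) rest2 hnod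
  unfold pvRaisesCond
  rw [hsplit]
  rcases hps : dotSplit rest2 with _ | ⟨q, qs⟩
  · exact absurd hps (dotSplit_ne_nil rest2)
  · simp only [List.dropLast_cons₂, List.all_cons, List.getLastD_cons]
    have hgood : pvGoodInit (c :: run) = true := by simp [pvGoodInit, hc, hrun]
    rw [hgood]
    simp

-- a single letter raises (the helper is called on the empty remainder)
theorem raises_single (c : Char) (hc : pvIsLetter c = true) : pvRaisesCond [c] = true := by
  have hnd : '.' ∉ [c] := by
    simp only [List.mem_singleton]
    exact fun h => letter_ne_dot hc h.symm
  unfold pvRaisesCond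
  rw [dotSplit_no_dot [c] hnd]
  simp [pvLastOk, hc]

theorem main_lemma : ∀ (n : ℕ) (w es : List Char),
    w.length ≤ n → pvRaisesCond w = false → peA w es = peB w es true := by
  intro n
  induction n with
  | zero =>
    intro w es hlen hr
    rw [List.length_eq_zero_iff.mp (Nat.le_zero.mp hlen)] at hr
    simp [pvRaisesCond, dotSplit, pvLastOk] at hr
  | succ n ih =>
    intro w es hlen hr
    cases w with
    | nil => simp [pvRaisesCond, dotSplit, pvLastOk] at hr
    | cons c rest =>
      by_cases hc : pvIsLetter c
      · have hB : peB (c :: rest) es true = peB rest (es ++ [c]) false := by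
          rw [peB, if_pos rfl, if_pos hc]
        rcases ldsA_spec rest [] with ⟨h1, _⟩ | ⟨ld, d, rest2, heq, hall, hd, hres⟩ |
            ⟨hne, hall, d, hd, hres⟩
        · subst h1
          exact absurd hr (by simp [raises_single c hc])
        · subst heq
          rw [peA_cons_letter c (ld ++ d :: rest2) es hc d rest2 ([] ++ ld) (by simpa using hres),
              hB, peB_run ld (d :: rest2) (es ++ [c]) hall,
              peB_stop d rest2 ((es ++ [c]) ++ ld) hd]
          simp only [List.nil_append]
          split_ifs with hdot hsp
          · subst hdot
            have hrr : pvRaisesCond rest2 = false := by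
              rw [← raises_cons_piece c ld rest2 hc hall]
              simpa using hr
            have hlen2 : rest2.length ≤ n := by
              simp at hlen; omega
            exact ih rest2 _ hlen2 hrr
          · rfl
          · rfl
        · rw [peA_cons_letter c rest es hc d [] ([] ++ rest) (by simpa using hres),
              if_neg (letdig_ne_dot hd), if_neg (letdig_ne_space hd), hB]
          have : peB (rest ++ []) (es ++ [c]) false = peB [] ((es ++ [c]) ++ rest) false :=
            peB_run rest [] (es ++ [c]) hall
          rw [List.append_nil] at this
          rw [this, peB]
          simp
      · rw [peA, peB, if_pos rfl, if_neg hc, if_neg hc]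
  -- (both sides branch identically on c = ' ')

-- ===== VERDICT (by name: the statement is the Claim_ definition above) =====
theorem parse_element_spec : Claim_equal_parse_element := by
  intro command es _ hpre
  unfold Spec_parse_element parse_element parse_element_alt
  rw [main_lemma command.toList.length command.toList es.toList le_rfl hpre]
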